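-- pv_equiv track=rewrite | github.com/JBLarson/wikiVector | src/pipeline_embeddings/process_backlinks.py | is_special_page
-- ===== SOURCE A (Python) =====
-- def is_special_page(normalized_title: str) -> bool:
--     """
--     Filter out special pages that shouldn't count as backlinks.
--
--     These are meta-pages, not actual articles.
--     """
--     if not normalized_title:
--         return True
--
--     # Common special page prefixes (already lowercase from normalization)
--     special_prefixes = [
--         'file:', 'image:', 'category:', 'template:',
--         'wikipedia:', 'help:', 'portal:', 'user:',
--         'talk:', 'mediawiki:', 'special:'
--     ]
--
--     return any(normalized_title.startswith(prefix) for prefix in special_prefixes)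
-- ===== SOURCE B (Python) =====
-- _SPECIAL_NAMES = frozenset({
--     'file', 'image', 'category', 'template',
--     'wikipedia', 'help', 'portal', 'user',
--     'talk', 'mediawiki', 'special'
-- })
--
--
-- def is_special_page(normalized_title: str) -> bool:
--     """
--     Filter out special pages that shouldn't count as backlinks.
--
--     These are meta-pages, not actual articles.
--     """
--     if not normalized_title:
--         return True
--     head, sep, _ = normalized_title.partition(':')
--     return bool(sep) and head in _SPECIAL_NAMES
-- ===== Notes on version B (the rewrite author's own statement) =====
-- stated objective: idiomatic
-- what changed: Replaces the 11-way startswith scan with a single partition at the first colon followed by one frozenset membership test of the namespace name.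
import Mathlib
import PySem

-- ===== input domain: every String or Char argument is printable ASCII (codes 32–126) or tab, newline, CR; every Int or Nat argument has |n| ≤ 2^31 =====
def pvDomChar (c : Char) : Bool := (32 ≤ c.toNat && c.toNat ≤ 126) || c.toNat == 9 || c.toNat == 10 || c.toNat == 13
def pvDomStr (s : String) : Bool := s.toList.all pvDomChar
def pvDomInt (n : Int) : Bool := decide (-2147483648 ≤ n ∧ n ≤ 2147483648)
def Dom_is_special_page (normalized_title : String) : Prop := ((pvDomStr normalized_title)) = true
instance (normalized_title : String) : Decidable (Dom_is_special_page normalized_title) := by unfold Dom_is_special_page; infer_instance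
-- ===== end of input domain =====

-- B replaces A's 11-way startswith scan by one partition at the first colon plus a set lookup (idiomatic).

-- ===== PORT A =====
def pvSpecialPrefixes : List String :=
  ["file:", "image:", "category:", "template:",
   "wikipedia:", "help:", "portal:", "user:",
   "talk:", "mediawiki:", "special:"]

def is_special_page (normalized_title : String) : Bool :=
  if normalized_title = "" then true
  else pvSpecialPrefixes.any (fun p => PySem.Str.startswith normalized_title p)

-- ===== PORT B =====
-- the frozenset of namespace names (distinct elements, PySem.Set convention)
def pvSpecialNames : PySem.Set (List Char) :=
  PySem.Set.ofList
    ["file".toList, "image".toList, "category".toList, "template".toList,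
     "wikipedia".toList, "help".toList, "portal".toList, "user".toList,
     "talk".toList, "mediawiki".toList, "special".toList]

-- s.partition(':') : head = chars before the first ':', sep nonempty iff ':' occurs
def is_special_page_alt (normalized_title : String) : Bool :=
  let cs := normalized_title.toList
  if cs = [] then true
  else
    let head := cs.takeWhile (· != ':')
    cs.contains ':' && PySem.Set.contains pvSpecialNames head

-- ===== PRECONDITION & SPEC =====
def Spec_is_special_page (normalized_title : String) (out : Bool) : Prop := out = is_special_page_alt normalized_title
instance (normalized_title : String) (out : Bool) : Decidable (Spec_is_special_page normalized_title out) := by unfold Spec_is_special_page; infer_instance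

-- ===== CLAIM (what is proved, stated in full; the proofs are below) =====
def Claim_equal_is_special_page : Prop := ∀ (normalized_title : String), Dom_is_special_page normalized_title → Spec_is_special_page normalized_title (is_special_page normalized_title)

-- ===== LEMMAS AND PROOFS =====

-- (w ++ [':']) is a prefix of l  iff  the part of l before the first ':' is exactly w and ':' occurs in l
theorem pv_pref_colon (w l : List Char) (hw : ':' ∉ w) :
    (w ++ [':']) <+: l ↔ (l.takeWhile (· != ':') = w ∧ ':' ∈ l) := by
  induction w generalizing l with
  | nil =>
    cases l with
    | nil => simp
    | cons c t =>
      by_cases hc : c = ':'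
      · subst hc; simp
      · simp [hc, Ne.symm hc, List.cons_prefix_cons]
  | cons a w' ih =>
    have ha : a ≠ ':' := fun h => hw (h ▸ List.mem_cons_self ..)
    have hw' : ':' ∉ w' := fun h => hw (List.mem_cons_of_mem _ h)
    cases l with
    | nil => simp
    | cons c t =>
      by_cases hc : c = ':'
      · subst hc
        simp [List.cons_prefix_cons, ha]
      · simp [List.cons_prefix_cons, hc, ih t hw', eq_comm (a := a) (b := c)]
        tauto

-- the generic shape of the equivalence, over any list of colon-free names
theorem pv_any_pref (names : List (List Char)) (l : List Char)
    (hn : ∀ w ∈ names, ':' ∉ w) :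
    (names.any (fun w => PySem.Chars.startswith l (w ++ [':'])))
      = (l.contains ':' && names.contains (l.takeWhile (· != ':'))) := by
  induction names with
  | nil => simp
  | cons w ws ih =>
    have hw : ':' ∉ w := hn w (List.mem_cons_self ..)
    have hws : ∀ v ∈ ws, ':' ∉ v := fun v hv => hn v (List.mem_cons_of_mem _ hv)
    have hsw : PySem.Chars.startswith l (w ++ [':']) = decide ((w ++ [':']) <+: l) := by
      rw [Bool.eq_iff_iff]; simp [PySem.Chars.startswith_iff]
    simp only [List.any_cons, List.contains_cons, ih hws, hsw]
    by_cases hc : ':' ∈ l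
    · by_cases he : l.takeWhile (· != ':') = w
      · simp [pv_pref_colon w l hw, hc, he]
      · simp [pv_pref_colon w l hw, hc, he]
    · simp [pv_pref_colon w l hw, hc]

-- ===== VERDICT (by name: the statement is the Claim_ definition above) =====
theorem is_special_page_spec : Claim_equal_is_special_page := by
  intro s _
  show is_special_page s = is_special_page_alt s
  unfold is_special_page is_special_page_alt
  by_cases h : s = ""
  · simp [h]
  · have hl : s.toList ≠ [] := fun hnil => h (by
      have := congrArg String.ofList hnil
      simpa [String.ofList_toList, String.ofList_nil] using this)
    rw [if_neg h]
    simp only [hl, reduceIte]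
    have e1 : "file:".toList = "file".toList ++ [':'] := by decide
    have e2 : "image:".toList = "image".toList ++ [':'] := by decide
    have e3 : "category:".toList = "category".toList ++ [':'] := by decide
    have e4 : "template:".toList = "template".toList ++ [':'] := by decide
    have e5 : "wikipedia:".toList = "wikipedia".toList ++ [':'] := by decide
    have e6 : "help:".toList = "help".toList ++ [':'] := by decide
    have e7 : "portal:".toList = "portal".toList ++ [':'] := by decide
    have e8 : "user:".toList = "user".toList ++ [':'] := by decide
    have e9 : "talk:".toList = "talk".toList ++ [':'] := by decide
    have e10 : "mediawiki:".toList = "mediawiki".toList ++ [':'] := by decide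
    have e11 : "special:".toList = "special".toList ++ [':'] := by decide
    have hset : pvSpecialNames =
        ["file".toList, "image".toList, "category".toList, "template".toList,
         "wikipedia".toList, "help".toList, "portal".toList, "user".toList,
         "talk".toList, "mediawiki".toList, "special".toList] := by decide
    have hany := pv_any_pref
        ["file".toList, "image".toList, "category".toList, "template".toList,
         "wikipedia".toList, "help".toList, "portal".toList, "user".toList,
         "talk".toList, "mediawiki".toList, "special".toList] s.toList (by decide)
    simp only [pvSpecialPrefixes, PySem.Str.startswith_eq, List.any_cons, List.any_nil,
      e1, e2, e3, e4, e5, e6, e7, e8, e9, e10, e11] at *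
    rw [hany, hset]
    simp [PySem.Set.contains]
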